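-- pv_equiv track=rewrite | github.com/miseop25/Back_Jun_Code_Study | For_code_Test/codility/test3.py | solution
-- ===== SOURCE A (Python) =====
-- def solution(A):
--     # write your code in Python 3.6
--     buf = A[0]
--     ans_list = []
--     cnt = 0
--     for i in A[1 :] :
--         if i == buf :
--             cnt +=1
--             if buf == 1 :
--                 buf = 0
--             else :
--                 buf = 1
--         else :
--             buf = i
--
--     ans_list.append(cnt)
--
--     cnt = 1
--     if A[0] == 1 :
--         buf = 0
--     else :
--         buf = 1
--
--     for i in A[1 :] :
--         if i == buf :
--             cnt +=1
--             if buf == 1 :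
--                 buf = 0
--             else :
--                 buf = 1
--         else :
--             buf = i
--     ans_list.append(cnt)
--
--     ans_list.sort()
--     return ans_list[0]
-- ===== SOURCE B (Python) =====
-- def _runs(xs):
--     rs = []
--     cur = 0
--     cnt = 0
--     for x in xs:
--         if cnt > 0 and x == cur:
--             cnt += 1
--         else:
--             if cnt > 0:
--                 rs.append((cur, cnt))
--             cur = x
--             cnt = 1
--     if cnt > 0:
--         rs.append((cur, cnt))
--     return rs
--
--
-- def _count(b, c, rs):
--     for v, L in rs:
--         if b == v:
--             c += (L + 1) // 2
--             b = (0 if v == 1 else 1) if L % 2 == 1 else v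
--         else:
--             c += L // 2
--             b = (0 if v == 1 else 1) if L % 2 == 0 else v
--     return c
--
--
-- def solution(A):
--     buf0 = A[0]
--     rs = _runs(A[1:])
--     c1 = _count(buf0, 0, rs)
--     c2 = _count(0 if buf0 == 1 else 1, 1, rs)
--     return min(c1, c2)
-- ===== Notes on version B (the rewrite author's own statement) =====
-- stated objective: alternative
-- what changed: B run-length encodes the tail once and computes each scenario's match count by closed-form parity arithmetic per run ((L+1)//2 or L//2 plus an exit-state formula), instead of A's element-by-element toggling state machine run twice plus a list-and-sort for the minimum.
import Mathlib
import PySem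

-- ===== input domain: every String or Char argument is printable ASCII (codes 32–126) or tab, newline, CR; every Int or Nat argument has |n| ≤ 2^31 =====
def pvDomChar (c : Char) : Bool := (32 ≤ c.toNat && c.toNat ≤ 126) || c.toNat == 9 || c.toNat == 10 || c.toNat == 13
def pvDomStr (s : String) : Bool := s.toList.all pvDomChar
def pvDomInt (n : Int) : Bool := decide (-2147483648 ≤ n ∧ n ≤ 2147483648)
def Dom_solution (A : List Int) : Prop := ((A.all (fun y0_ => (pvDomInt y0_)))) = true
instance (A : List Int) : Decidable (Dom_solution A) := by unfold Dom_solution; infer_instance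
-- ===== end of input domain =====

-- B replaces A's two element-by-element toggling passes by one run-length encoding of the
-- tail plus closed-form parity arithmetic per run (objective: alternative).

-- ===== PORT A =====
-- the body of both of A's loops (identical code, used twice in A)
def aStep (s : Int × Int) (i : Int) : Int × Int :=
  if i = s.1 then ((if s.1 = 1 then (0 : Int) else 1), s.2 + 1) else (i, s.2)

def solution (A : List Int) : Int :=
  match A with
  | [] => 0   -- Python raises IndexError reading A[0]; excluded by Pre_solution
  | a0 :: _ =>
    let rest := PySem.List.slice A (some 1) none
    let s1 := rest.foldl aStep (a0, 0)
    let ansList : List Int := [s1.2]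
    let buf2 : Int := if a0 = 1 then 0 else 1
    let s2 := rest.foldl aStep (buf2, 1)
    let ansList2 := ansList ++ [s2.2]
    let sortedL := PySem.List.sorted ansList2 (fun x => x) false
    (PySem.List.pyGet? sortedL 0).getD 0

-- ===== PORT B =====
-- loop body of _runs in Source B; state (rs, cur, cnt)
def runsStep (s : List (Int × Int) × Int × Int) (x : Int) : List (Int × Int) × Int × Int :=
  if 0 < s.2.2 ∧ x = s.2.1 then (s.1, s.2.1, s.2.2 + 1)
  else (s.1 ++ (if 0 < s.2.2 then [(s.2.1, s.2.2)] else []), x, 1)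

-- _runs of Source B
def runsB (xs : List Int) : List (Int × Int) :=
  let f := xs.foldl runsStep ([], 0, 0)
  f.1 ++ (if 0 < f.2.2 then [(f.2.1, f.2.2)] else [])

-- loop body of _count in Source B; state (b, c)
def countStep (s : Int × Int) (p : Int × Int) : Int × Int :=
  if s.1 = p.1 then
    ((if PySem.Int.mod p.2 2 = 1 then (if p.1 = 1 then (0 : Int) else 1) else p.1),
     s.2 + PySem.Int.floordiv (p.2 + 1) 2)
  else
    ((if PySem.Int.mod p.2 2 = 0 then (if p.1 = 1 then (0 : Int) else 1) else p.1),
     s.2 + PySem.Int.floordiv p.2 2)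

def solution_alt (A : List Int) : Int :=
  match A with
  | [] => 0   -- Python raises IndexError reading A[0]; excluded by Pre_solution
  | a0 :: _ =>
    let rs := runsB (PySem.List.slice A (some 1) none)
    let c1 := (rs.foldl countStep (a0, 0)).2
    let c2 := (rs.foldl countStep ((if a0 = 1 then (0 : Int) else 1), 1)).2
    min c1 c2

-- ===== PRECONDITION & SPEC =====
-- Pre_ excludes only the empty list, on which A (and B) raise IndexError reading A[0].
def Pre_solution (A : List Int) : Prop := A ≠ []
instance (A : List Int) : Decidable (Pre_solution A) := by unfold Pre_solution; infer_instance
def pvWitness_solution : List Int := ([1, 0, 1] : List Int)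

def Spec_solution (A : List Int) (out : Int) : Prop := out = solution_alt A
instance (A : List Int) (out : Int) : Decidable (Spec_solution A out) := by unfold Spec_solution; infer_instance

-- ===== CLAIM (what is proved, stated in full; the proofs are below) =====
def Claim_equal_solution : Prop := ∀ (A : List Int), Dom_solution A → Pre_solution A → Spec_solution A (solution A)

-- ===== LEMMAS AND PROOFS =====

-- A's fold over a constant run, in closed form
lemma run_fold (v : Int) : ∀ (n : Nat) (b c : Int),
    List.foldl aStep (b, c) (List.replicate n v) =
      ((if n = 0 then b else
          if (if b = v then n % 2 = 1 else n % 2 = 0) then (if v = 1 then (0 : Int) else 1) else v),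
       c + (if b = v then (((n + 1) / 2 : Nat) : Int) else ((n / 2 : Nat) : Int))) := by
  intro n
  induction n with
  | zero => intro b c; simp
  | succ n ih =>
    intro b c
    have hT : (if v = 1 then (0 : Int) else 1) ≠ v := by split_ifs <;> omega
    rw [List.replicate_succ, List.foldl_cons]
    by_cases hb : b = v
    · subst hb
      have h1 : aStep (b, c) b = ((if b = 1 then (0 : Int) else 1), c + 1) := by
        simp [aStep]
      rw [h1, ih]
      refine Prod.ext ?_ ?_ <;>
        · simp only
          split_ifs <;> first | rfl | omega | (exfalso; omega)
    · have h1 : aStep (b, c) v = (v, c) := by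
        have hvb : ¬ v = b := fun h => hb h.symm
        simp [aStep, hvb]
      rw [h1, ih]
      refine Prod.ext ?_ ?_ <;>
        · simp only
          split_ifs <;> first | rfl | omega | (exfalso; omega)

-- one run of length L ≥ 1 processed by A equals one step of B's per-run arithmetic
lemma run_bstep (b c v L : Int) (hL : 1 ≤ L) :
    List.foldl aStep (b, c) (List.replicate L.toNat v) = countStep (b, c) (v, L) := by
  rw [run_fold]
  unfold countStep
  have hmod : PySem.Int.mod L 2 = L % 2 := PySem.Int.mod_eq_emod_of_pos (by omega)
  have hd1 : PySem.Int.floordiv (L + 1) 2 = (L + 1) / 2 :=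
    PySem.Int.floordiv_eq_ediv_of_pos (by omega)
  have hd2 : PySem.Int.floordiv L 2 = L / 2 :=
    PySem.Int.floordiv_eq_ediv_of_pos (by omega)
  have hn : (L.toNat : Int) = L := Int.toNat_of_nonneg (by omega)
  simp only [hmod, hd1, hd2]
  refine Prod.ext ?_ ?_ <;>
    · simp only
      split_ifs <;> first | rfl | omega | (exfalso; omega)

def joinRuns (rs : List (Int × Int)) : List Int :=
  rs.flatMap (fun p => List.replicate p.2.toNat p.1)

lemma fold_join : ∀ (rs : List (Int × Int)), (∀ p ∈ rs, 1 ≤ p.2) → ∀ (s : Int × Int),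
    List.foldl aStep s (joinRuns rs) = List.foldl countStep s rs := by
  intro rs
  induction rs with
  | nil => intro _ s; rfl
  | cons p t ih =>
    intro h s
    obtain ⟨b, c⟩ := s
    have hj : joinRuns (p :: t) = List.replicate p.2.toNat p.1 ++ joinRuns t := by
      simp [joinRuns]
    rw [hj, List.foldl_append, run_bstep b c p.1 p.2 (h p (by simp)),
        List.foldl_cons]
    exact ih (fun q hq => h q (by simp [hq])) _

def finalizeR (s : List (Int × Int) × Int × Int) : List (Int × Int) :=
  s.1 ++ (if 0 < s.2.2 then [(s.2.1, s.2.2)] else [])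

lemma runs_inv : ∀ (xs : List Int) (rs : List (Int × Int)) (cur cnt : Int),
    0 ≤ cnt → (∀ p ∈ rs, 1 ≤ p.2) →
    (∀ p ∈ finalizeR (xs.foldl runsStep (rs, cur, cnt)), 1 ≤ p.2) ∧
      joinRuns (finalizeR (xs.foldl runsStep (rs, cur, cnt))) =
        joinRuns rs ++ List.replicate cnt.toNat cur ++ xs := by
  intro xs
  induction xs with
  | nil =>
    intro rs cur cnt hc hl
    by_cases h : 0 < cnt
    · constructor
      · intro p hp
        simp only [List.foldl_nil, finalizeR, if_pos h, List.mem_append, List.mem_singleton] at hp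
        rcases hp with hp | hp
        · exact hl p hp
        · subst hp; exact h
      · simp [finalizeR, if_pos h, joinRuns, List.flatMap_append]
    · have hc0 : cnt = 0 := by omega
      constructor
      · intro p hp
        simp only [List.foldl_nil, finalizeR, if_neg h, List.append_nil] at hp
        exact hl p hp
      · simp [finalizeR, if_neg h, hc0, joinRuns]
  | cons x xs ih =>
    intro rs cur cnt hc hl
    rw [List.foldl_cons]
    by_cases h : 0 < cnt ∧ x = cur
    · have hstep : runsStep (rs, cur, cnt) x = (rs, cur, cnt + 1) := by
        simp [runsStep, h]
      rw [hstep]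
      obtain ⟨h1, h2⟩ := ih rs cur (cnt + 1) (by omega) hl
      refine ⟨h1, ?_⟩
      rw [h2]
      have : (cnt + 1).toNat = cnt.toNat + 1 := by omega
      rw [this, List.replicate_succ']
      simp [h.2, List.append_assoc]
    · have hstep : runsStep (rs, cur, cnt) x =
          (rs ++ (if 0 < cnt then [(cur, cnt)] else []), x, 1) := by
        simp [runsStep, h]
      rw [hstep]
      have hl' : ∀ p ∈ rs ++ (if 0 < cnt then [(cur, cnt)] else []), 1 ≤ p.2 := by
        intro p hp
        by_cases hcp : 0 < cnt
        · simp only [if_pos hcp, List.mem_append, List.mem_singleton] at hp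
          rcases hp with hp | hp
          · exact hl p hp
          · subst hp; exact hcp
        · simp only [if_neg hcp, List.append_nil] at hp
          exact hl p hp
      obtain ⟨h1, h2⟩ := ih (rs ++ (if 0 < cnt then [(cur, cnt)] else [])) x 1 (by omega) hl'
      refine ⟨h1, ?_⟩
      rw [h2]
      have hjr : joinRuns (rs ++ (if 0 < cnt then [(cur, cnt)] else [])) =
          joinRuns rs ++ List.replicate cnt.toNat cur := by
        by_cases hcp : 0 < cnt
        · simp [if_pos hcp, joinRuns, List.flatMap_append]
        · have hc0 : cnt = 0 := by omega
          simp [if_neg hcp, hc0, joinRuns]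
      rw [hjr]
      simp [List.append_assoc, List.replicate]

lemma sorted_two_head (x y : Int) :
    (PySem.List.pyGet? (PySem.List.sorted [x, y] (fun z => z) false) 0).getD 0 = min x y := by
  by_cases h : x ≤ y
  · rw [PySem.List.sorted_eq_self_of_pairwise [x, y] (fun z => z) (by simp [h])]
    simp [PySem.List.pyGet?, PySem.List.pyIdx?, min_eq_left h]
  · rw [PySem.List.sorted_eq_of_perm_of_pairwise_lt [x, y] [y, x] (fun z => z)
        (List.Perm.swap x y []) (by simp; omega)]
    simp [PySem.List.pyGet?, PySem.List.pyIdx?, min_eq_right (by omega : y ≤ x)]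

-- ===== VERDICT (by name: the statement is the Claim_ definition above) =====
theorem solution_spec : Claim_equal_solution := by
  intro A _ hpre
  unfold Spec_solution
  match A with
  | [] => exact absurd rfl hpre
  | a0 :: t =>
    show solution (a0 :: t) = solution_alt (a0 :: t)
    unfold solution solution_alt
    simp only [PySem.List.slice_from_one, List.tail_cons]
    obtain ⟨hlen, hjoin⟩ := runs_inv t [] 0 0 le_rfl (by simp)
    have hruns : runsB t = finalizeR (t.foldl runsStep ([], 0, 0)) := rfl
    have hlen' : ∀ p ∈ runsB t, 1 ≤ p.2 := by rw [hruns]; exact hlen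
    have hj : joinRuns (runsB t) = t := by
      rw [hruns, hjoin]; simp [joinRuns]
    have hfold : ∀ s : Int × Int, List.foldl aStep s t = List.foldl countStep s (runsB t) := by
      intro s
      rw [← fold_join (runsB t) hlen' s, hj]
    rw [hfold (a0, 0), hfold ((if a0 = 1 then (0 : Int) else 1), 1)]
    exact sorted_two_head _ _
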